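-- pv_equiv track=rewrite | github.com/CodingThrust/problem-reductions | docs/paper/verify-reductions/adversary_three_partition_dynamic_storage_allocation.py | adv_eval_dsa
-- ===== SOURCE A (Python) =====
-- def adv_eval_dsa(
--     items: list[tuple[int, int, int]], memory_size: int, config: list[int]
-- ) -> bool:
--     """Evaluate whether config is a valid DSA solution."""
--     n = len(items)
--     if len(config) != n:
--         return False
--     for i in range(n):
--         a_i, d_i, s_i = items[i]
--         sigma_i = config[i]
--         if sigma_i < 0 or sigma_i + s_i > memory_size:
--             return False
--         for j in range(i + 1, n):
--             a_j, d_j, s_j = items[j]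
--             sigma_j = config[j]
--             if a_i < d_j and a_j < d_i:
--                 if not (sigma_i + s_i <= sigma_j or sigma_j + s_j <= sigma_i):
--                     return False
--     return True
-- ===== SOURCE B (Python) =====
-- def adv_eval_dsa(
--     items: list[tuple[int, int, int]], memory_size: int, config: list[int]
-- ) -> bool:
--     """Evaluate whether config is a valid DSA solution (sweep over arrival times)."""
--     if len(config) != len(items):
--         return False
--     # sweep line: process items in order of arrival; keep an active list of
--     # items whose departure is still in the future, compare only against those
--     active = []
--     for (a, d, s), sigma in sorted(zip(items, config), key=lambda p: p[0][0]):
--         active = [x for x in active if a < x[0][1]]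
--         if sigma < 0 or sigma + s > memory_size:
--             return False
--         for (ax, dx, sx), sx_sigma in active:
--             if ax < d and not (sx_sigma + sx <= sigma or sigma + s <= sx_sigma):
--                 return False
--         active.append(((a, d, s), sigma))
--     return True
-- ===== Notes on version B (the rewrite author's own statement) =====
-- stated objective: alternative
-- what changed: Replaced the all-pairs nested index loops by an arrival-ordered sweep line that keeps an active set of not-yet-departed items and compares each item only against the active ones.
import Mathlib
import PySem

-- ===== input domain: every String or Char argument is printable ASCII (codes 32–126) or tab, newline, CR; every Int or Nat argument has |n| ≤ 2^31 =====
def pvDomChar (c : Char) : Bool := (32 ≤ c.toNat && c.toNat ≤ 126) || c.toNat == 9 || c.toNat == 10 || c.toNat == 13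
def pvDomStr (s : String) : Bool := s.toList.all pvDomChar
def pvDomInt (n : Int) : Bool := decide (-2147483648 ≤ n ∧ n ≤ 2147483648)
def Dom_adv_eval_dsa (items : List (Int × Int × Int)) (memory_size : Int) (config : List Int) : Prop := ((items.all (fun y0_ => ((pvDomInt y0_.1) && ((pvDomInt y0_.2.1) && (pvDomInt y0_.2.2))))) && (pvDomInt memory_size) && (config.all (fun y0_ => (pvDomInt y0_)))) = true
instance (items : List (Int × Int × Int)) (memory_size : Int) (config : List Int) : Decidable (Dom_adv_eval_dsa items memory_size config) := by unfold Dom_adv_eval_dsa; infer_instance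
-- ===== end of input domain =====

-- B replaces A's all-pairs nested loops by an arrival-ordered sweep with an active set
-- (objective: alternative algorithm; same return value on every input).

-- ===== PORT A =====
-- inner loop: for j in range(i+1, n)
def aInner (ai di si σi : Int) : List ((Int × Int × Int) × Int) → Bool
  | [] => true
  | ((aj, dj, sj), σj) :: t =>
    if ai < dj ∧ aj < di then
      if ¬ (σi + si ≤ σj ∨ σj + sj ≤ σi) then false
      else aInner ai di si σi t
    else aInner ai di si σi t

-- outer loop: for i in range(n)
def aOuter (ms : Int) : List ((Int × Int × Int) × Int) → Bool
  | [] => true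
  | ((ai, di, si), σi) :: t =>
    if σi < 0 ∨ σi + si > ms then false
    else if aInner ai di si σi t then aOuter ms t
    else false

def adv_eval_dsa (items : List (Int × Int × Int)) (memory_size : Int) (config : List Int) : Bool :=
  if config.length ≠ items.length then false
  else aOuter memory_size (items.zip config)

-- ===== PORT B =====
-- inner comparison loop of B: compare the new item against every active item
def bCheck (d s σ : Int) : List ((Int × Int × Int) × Int) → Bool
  | [] => true
  | ((ax, _dx, sx), σx) :: t =>
    if ax < d ∧ ¬ (σx + sx ≤ σ ∨ σ + s ≤ σx) then false
    else bCheck d s σ t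

-- sweep: items in arrival order, dropping departed items from the active list
def bSweep (ms : Int) (active : List ((Int × Int × Int) × Int)) :
    List ((Int × Int × Int) × Int) → Bool
  | [] => true
  | ((a, d, s), σ) :: t =>
    let act := active.filter (fun x => decide (a < x.1.2.1))
    if σ < 0 ∨ σ + s > ms then false
    else if bCheck d s σ act then bSweep ms (act ++ [((a, d, s), σ)]) t
    else false

def adv_eval_dsa_alt (items : List (Int × Int × Int)) (memory_size : Int) (config : List Int) : Bool :=
  if config.length ≠ items.length then false
  else bSweep memory_size [] (PySem.List.sorted (items.zip config) (fun p => p.1.1) false)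

-- ===== PRECONDITION & SPEC =====
def Spec_adv_eval_dsa (items : List (Int × Int × Int)) (memory_size : Int) (config : List Int) (out : Bool) : Prop := out = adv_eval_dsa_alt items memory_size config
instance (items : List (Int × Int × Int)) (memory_size : Int) (config : List Int) (out : Bool) : Decidable (Spec_adv_eval_dsa items memory_size config out) := by unfold Spec_adv_eval_dsa; infer_instance

-- ===== CLAIM (what is proved, stated in full; the proofs are below) =====
def Claim_equal_adv_eval_dsa : Prop := ∀ (items : List (Int × Int × Int)) (memory_size : Int) (config : List Int), Dom_adv_eval_dsa items memory_size config → Spec_adv_eval_dsa items memory_size config (adv_eval_dsa items memory_size config)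

-- ===== LEMMAS AND PROOFS =====

-- the common specification: bounds for every item, and memory-compatibility of
-- every time-overlapping pair
def Bnd (ms : Int) (x : (Int × Int × Int) × Int) : Prop :=
  ¬ (x.2 < 0 ∨ x.2 + x.1.2.2 > ms)

def Cmp (x y : (Int × Int × Int) × Int) : Prop :=
  (x.1.1 < y.1.2.1 ∧ y.1.1 < x.1.2.1) → (x.2 + x.1.2.2 ≤ y.2 ∨ y.2 + y.1.2.2 ≤ x.2)

theorem Cmp_symm : Symmetric Cmp := by
  intro x y h hov
  rcases h ⟨hov.2, hov.1⟩ with h1 | h1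
  · exact Or.inr h1
  · exact Or.inl h1

theorem aInner_iff (ai di si σi : Int) (t : List ((Int × Int × Int) × Int)) :
    aInner ai di si σi t = true ↔ ∀ y ∈ t, Cmp ((ai, di, si), σi) y := by
  induction t with
  | nil => simp [aInner]
  | cons y t ih =>
    obtain ⟨⟨aj, dj, sj⟩, σj⟩ := y
    rw [List.forall_mem_cons]
    by_cases hov : ai < dj ∧ aj < di
    · by_cases hm : ¬ (σi + si ≤ σj ∨ σj + sj ≤ σi)
      · simp only [aInner, if_pos hov, if_pos hm]
        constructor
        · intro h; exact absurd h (by decide)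
        · rintro ⟨h1, _⟩; exact absurd (h1 hov) hm
      · simp only [aInner, if_pos hov, if_neg hm, ih]
        constructor
        · intro h; exact ⟨fun _ => not_not.mp hm, h⟩
        · rintro ⟨_, h⟩; exact h
    · simp only [aInner, if_neg hov, ih]
      constructor
      · intro h; exact ⟨fun hc => absurd hc hov, h⟩
      · rintro ⟨_, h⟩; exact h

theorem aOuter_iff (ms : Int) (L : List ((Int × Int × Int) × Int)) :
    aOuter ms L = true ↔ (∀ x ∈ L, Bnd ms x) ∧ L.Pairwise Cmp := by
  induction L with
  | nil => simp [aOuter]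
  | cons x t ih =>
    obtain ⟨⟨ai, di, si⟩, σi⟩ := x
    rw [List.forall_mem_cons, List.pairwise_cons]
    by_cases hb : σi < 0 ∨ σi + si > ms
    · simp only [aOuter, if_pos hb]
      constructor
      · intro h; exact absurd h (by decide)
      · rintro ⟨⟨h1, _⟩, _⟩; exact absurd hb h1
    · simp only [aOuter, if_neg hb]
      by_cases hin : aInner ai di si σi t = true
      · rw [if_pos hin, ih]
        constructor
        · rintro ⟨h1, h2⟩; exact ⟨⟨hb, h1⟩, (aInner_iff ai di si σi t).mp hin, h2⟩
        · rintro ⟨⟨_, h1⟩, _, h2⟩; exact ⟨h1, h2⟩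
      · rw [if_neg hin]
        constructor
        · intro h; exact absurd h (by decide)
        · rintro ⟨_, h1, _⟩; exact absurd ((aInner_iff ai di si σi t).mpr h1) hin

theorem bCheck_iff (d s σ : Int) (act : List ((Int × Int × Int) × Int)) :
    bCheck d s σ act = true ↔
      ∀ x ∈ act, x.1.1 < d → (x.2 + x.1.2.2 ≤ σ ∨ σ + s ≤ x.2) := by
  induction act with
  | nil => simp [bCheck]
  | cons x t ih =>
    obtain ⟨⟨ax, dx, sx⟩, σx⟩ := x
    rw [List.forall_mem_cons]
    by_cases hc : ax < d ∧ ¬ (σx + sx ≤ σ ∨ σ + s ≤ σx)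
    · simp only [bCheck, if_pos hc]
      constructor
      · intro h; exact absurd h (by decide)
      · rintro ⟨h1, _⟩; exact absurd (h1 hc.1) hc.2
    · simp only [bCheck, if_neg hc, ih]
      constructor
      · intro h
        refine ⟨fun ha => ?_, h⟩
        by_contra hm
        exact hc ⟨ha, hm⟩
      · rintro ⟨_, h⟩; exact h

theorem bSweep_iff (ms : Int) (L : List ((Int × Int × Int) × Int)) :
    ∀ act, L.Pairwise (fun x y => x.1.1 ≤ y.1.1) →
    (∀ x ∈ act, ∀ y ∈ L, x.1.1 ≤ y.1.1) →
    (bSweep ms act L = true ↔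
      (∀ y ∈ L, Bnd ms y) ∧ (∀ x ∈ act, ∀ y ∈ L, Cmp x y) ∧ L.Pairwise Cmp) := by
  induction L with
  | nil => intro act _ _; simp [bSweep]
  | cons y t ih =>
    intro act hsort hact
    obtain ⟨⟨a, d, s⟩, σ⟩ := y
    rw [List.pairwise_cons] at hsort
    have ha_le : ∀ z ∈ t, a ≤ z.1.1 := fun z hz => hsort.1 z hz
    by_cases hb : σ < 0 ∨ σ + s > ms
    · simp only [bSweep, hb, if_true]
      constructor
      · intro h; exact absurd h (by decide)
      · rintro ⟨h1, _, _⟩; exact absurd hb (h1 _ (List.mem_cons_self ..))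
    · have hmem : ∀ x, x ∈ act.filter (fun x => decide (a < x.1.2.1)) ↔
          x ∈ act ∧ a < x.1.2.1 := by intro x; simp
      set act' := act.filter (fun x => decide (a < x.1.2.1)) with hact'
      have hact'2 : ∀ x ∈ act' ++ [((a, d, s), σ)], ∀ z ∈ t, x.1.1 ≤ z.1.1 := by
        intro x hx z hz
        rcases List.mem_append.mp hx with hx | hx
        · exact hact x ((hmem x).mp hx).1 z (List.mem_cons_of_mem _ hz)
        · simp at hx; subst hx; exact ha_le z hz
      have hIH := ih (act' ++ [((a, d, s), σ)]) hsort.2 hact'2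
      by_cases hchk : bCheck d s σ act' = true
      · simp only [bSweep, hb, if_false, ← hact', hchk, if_true]
        rw [hIH]
        rw [bCheck_iff] at hchk
        constructor
        · rintro ⟨h1, h2, h3⟩
          refine ⟨?_, ?_, ?_⟩
          · intro z hz
            rcases List.mem_cons.mp hz with hz | hz
            · subst hz; exact hb
            · exact h1 z hz
          · intro x hx z hz
            rcases List.mem_cons.mp hz with hz | hz
            · subst hz
              intro hov
              have hx' : x ∈ act' := (hmem x).mpr ⟨hx, hov.2⟩
              rcases hchk x hx' hov.1 with h' | h'
              exacts [Or.inl h', Or.inr h']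
            · by_cases hret : a < x.1.2.1
              · exact h2 x (List.mem_append.mpr (Or.inl ((hmem x).mpr ⟨hx, hret⟩))) z hz
              · intro hov
                exfalso
                have := ha_le z hz
                push_neg at hret
                omega
          · rw [List.pairwise_cons]
            constructor
            · intro z hz
              exact h2 _ (List.mem_append.mpr (Or.inr (by simp))) z hz
            · exact h3
        · rintro ⟨h1, h2, h3⟩
          rw [List.pairwise_cons] at h3
          refine ⟨fun z hz => h1 z (List.mem_cons_of_mem _ hz), ?_, h3.2⟩
          intro x hx z hz
          rcases List.mem_append.mp hx with hx | hx
          · exact h2 x ((hmem x).mp hx).1 z (List.mem_cons_of_mem _ hz)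
          · simp at hx; subst hx; exact h3.1 z hz
      · simp only [bSweep, hb, if_false, ← hact', hchk, Bool.false_eq_true, if_false]
        constructor
        · intro h; exact absurd h (by decide)
        · rintro ⟨h1, h2, h3⟩
          rw [bCheck_iff] at hchk
          push_neg at hchk
          obtain ⟨x, hx, hxd, hxm⟩ := hchk
          have h' := h2 x ((hmem x).mp hx).1 _ (List.mem_cons_self ..) ⟨hxd, ((hmem x).mp hx).2⟩
          dsimp only at h'
          rcases h' with h' | h' <;> omega

theorem ports_eq (items : List (Int × Int × Int)) (ms : Int) (config : List Int) :
    adv_eval_dsa items ms config = adv_eval_dsa_alt items ms config := by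
  unfold adv_eval_dsa adv_eval_dsa_alt
  by_cases hl : config.length ≠ items.length
  · simp [hl]
  · simp only [hl, if_false]
    have hperm : (PySem.List.sorted (items.zip config) (fun p => p.1.1) false).Perm
        (items.zip config) := PySem.List.sorted_perm ..
    rw [Bool.eq_iff_iff, aOuter_iff,
      bSweep_iff ms _ [] (PySem.List.sorted_pairwise ..) (by simp)]
    constructor
    · rintro ⟨h1, h2⟩
      exact ⟨fun y hy => h1 y (hperm.mem_iff.mp hy), by simp,
        (hperm.pairwise_iff (fun h => Cmp_symm h)).mpr h2⟩
    · rintro ⟨h1, _, h2⟩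
      exact ⟨fun y hy => h1 y (hperm.mem_iff.mpr hy),
        (hperm.pairwise_iff (fun h => Cmp_symm h)).mp h2⟩

-- ===== VERDICT (by name: the statement is the Claim_ definition above) =====
theorem adv_eval_dsa_spec : Claim_equal_adv_eval_dsa := by
  intro items ms config _
  unfold Spec_adv_eval_dsa
  exact ports_eq items ms config
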